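-- pv_equiv track=rewrite | github.com/iviocodes/mipt-msai-algorithms | assignment_2/task_1.py | bi_search_right
-- ===== SOURCE A (Python) =====
-- def bi_search_right(arr, r):
--     left, right = 0, len(arr)
--     while left < right:
--         mid = (left + right) // 2
--         if arr[mid] <= r:
--             left = mid + 1
--         else:
--             right = mid
--     return left
-- ===== SOURCE B (Python) =====
-- def bi_search_right(arr, r):
--     if not arr:
--         return 0
--     mid = len(arr) // 2
--     if arr[mid] <= r:
--         return mid + 1 + bi_search_right(arr[mid + 1:], r)
--     else:
--         return bi_search_right(arr[:mid], r)
-- ===== Notes on version B (the rewrite author's own statement) =====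
-- stated objective: alternative
-- what changed: Replaces the iterative two-pointer loop over index bounds with a divide-and-conquer recursion on list slices: compare the middle element, then recurse on the right slice (adding mid+1) or the left slice.
import Mathlib
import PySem

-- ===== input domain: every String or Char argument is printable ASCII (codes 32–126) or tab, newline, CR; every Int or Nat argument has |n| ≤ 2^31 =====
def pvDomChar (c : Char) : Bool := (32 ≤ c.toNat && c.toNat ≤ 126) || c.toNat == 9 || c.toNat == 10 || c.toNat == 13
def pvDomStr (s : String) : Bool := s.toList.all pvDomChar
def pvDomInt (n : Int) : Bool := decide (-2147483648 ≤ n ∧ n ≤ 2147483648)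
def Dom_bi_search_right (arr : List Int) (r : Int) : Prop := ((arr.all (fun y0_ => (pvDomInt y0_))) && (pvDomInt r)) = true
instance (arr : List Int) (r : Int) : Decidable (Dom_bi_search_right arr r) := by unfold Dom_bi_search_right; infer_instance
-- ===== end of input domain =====

-- B replaces A's iterative two-pointer index loop by a divide-and-conquer recursion on list slices; equal return value on all inputs.
-- ===== PORT A =====
-- while-loop of A as recursion on (left, right); arr[mid] is in range whenever left < right ≤ arr.length, so List.getD is exact there
def biLoopA (arr : List Int) (r : Int) (left right : Nat) : Nat :=
  if left < right then
    let mid := (left + right) / 2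
    if arr.getD mid 0 ≤ r then biLoopA arr r (mid + 1) right
    else biLoopA arr r left mid
  else left
termination_by right - left
decreasing_by all_goals omega

def bi_search_right (arr : List Int) (r : Int) : Int :=
  (biLoopA arr r 0 arr.length : Int)

-- ===== PORT B =====
def biRecB (arr : List Int) (r : Int) : Nat :=
  if arr.isEmpty then 0
  else
    let mid := arr.length / 2
    if arr.getD mid 0 ≤ r then mid + 1 + biRecB (arr.drop (mid + 1)) r
    else biRecB (arr.take mid) r
termination_by arr.length
decreasing_by
  all_goals simp only [List.length_drop, List.length_take]
  all_goals rename_i h _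
  all_goals rw [List.isEmpty_iff, ← List.length_eq_zero_iff] at h
  all_goals omega

def bi_search_right_alt (arr : List Int) (r : Int) : Int :=
  (biRecB arr r : Int)

-- ===== PRECONDITION & SPEC =====
def Spec_bi_search_right (arr : List Int) (r : Int) (out : Int) : Prop := out = bi_search_right_alt arr r
instance (arr : List Int) (r : Int) (out : Int) : Decidable (Spec_bi_search_right arr r out) := by unfold Spec_bi_search_right; infer_instance

-- ===== CLAIM (what is proved, stated in full; the proofs are below) =====
def Claim_equal_bi_search_right : Prop := ∀ (arr : List Int) (r : Int), Dom_bi_search_right arr r → Spec_bi_search_right arr r (bi_search_right arr r)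

-- ===== LEMMAS AND PROOFS =====

-- ===== VERDICT (by name: the statement is the Claim_ definition above) =====
theorem take_drop_getD (arr : List Int) (left k n : Nat) (h : k < n) :
    ((arr.drop left).take n).getD k 0 = arr.getD (left + k) 0 := by
  simp [List.getD, h, List.getElem?_drop]

-- The loop on the window [left, right) computes left + B's recursion on the slice arr[left:right].
theorem biLoopA_eq_biRecB (arr : List Int) (r : Int) (left right : Nat)
    (h1 : left ≤ right) (h2 : right ≤ arr.length) :
    biLoopA arr r left right = left + biRecB ((arr.drop left).take (right - left)) r := by
  rw [biLoopA, biRecB]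
  by_cases h : left < right
  · have hlen : ((arr.drop left).take (right - left)).length = right - left := by
      simp [List.length_take, List.length_drop]; omega
    have hne : ¬(((arr.drop left).take (right - left)).isEmpty = true) := by
      rw [List.isEmpty_iff, ← List.length_eq_zero_iff, hlen]; omega
    rw [if_pos h, if_neg hne]
    simp only [hlen]
    have hget : ((arr.drop left).take (right - left)).getD ((right - left) / 2) 0
        = arr.getD ((left + right) / 2) 0 := by
      rw [take_drop_getD arr left ((right - left) / 2) (right - left) (by omega)]
      congr 1; omega
    rw [hget]
    by_cases hc : arr.getD ((left + right) / 2) 0 ≤ r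
    · rw [if_pos hc, if_pos hc]
      rw [biLoopA_eq_biRecB arr r ((left + right) / 2 + 1) right (by omega) h2]
      rw [List.drop_take, List.drop_drop]
      have e1 : left + ((right - left) / 2 + 1) = (left + right) / 2 + 1 := by omega
      have e2 : right - left - ((right - left) / 2 + 1) = right - ((left + right) / 2 + 1) := by
        omega
      rw [e1, e2]
      have e3 : (right - left) / 2 = (left + right) / 2 - left := by omega
      rw [e3]
      omega
    · rw [if_neg hc, if_neg hc]
      rw [biLoopA_eq_biRecB arr r left ((left + right) / 2) (by omega) (by omega)]
      rw [List.take_take]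
      have e4 : min ((right - left) / 2) (right - left) = (left + right) / 2 - left := by omega
      rw [e4]
  · rw [if_neg h]
    have : right - left = 0 := by omega
    simp [this]
termination_by right - left
decreasing_by all_goals omega

theorem bi_search_right_spec : Claim_equal_bi_search_right := by
  intro arr r _
  unfold Spec_bi_search_right bi_search_right bi_search_right_alt
  rw [biLoopA_eq_biRecB arr r 0 arr.length (Nat.zero_le _) (le_refl _)]
  simp
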